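-- pv_equiv track=rewrite | github.com/thesahilalam/EncoPDF-Unlocker | src/attacks.py | brute_force_gen
-- ===== SOURCE A (Python) =====
-- import itertools
-- import string
--
-- def brute_force_gen(charset_choice, min_l, max_l, skip=0):
--     if charset_choice == "1": chars = string.digits
--     elif charset_choice == "2": chars = string.ascii_letters
--     else: chars = string.ascii_letters + string.digits + string.punctuation
--
--     current_count = 0
--     for length in range(min_l, max_l + 1):
--         for combo in itertools.product(chars, repeat=length):
--             if current_count < skip:
--                 current_count += 1
--                 continue
--             yield "".join(combo)
-- ===== SOURCE B (Python) =====
-- import string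
--
-- def brute_force_gen(charset_choice, min_l, max_l, skip=0):
--     # Instead of enumerating and discarding the first `skip` combinations,
--     # per length either the whole block of n**length combos is skipped
--     # arithmetically, or a digit odometer is started at the first wanted
--     # index and counted up, so no skipped combination is ever built.
--     if charset_choice == "1": chars = string.digits
--     elif charset_choice == "2": chars = string.ascii_letters
--     else: chars = string.ascii_letters + string.digits + string.punctuation
--     n = len(chars)
--     last = n - 1
--     remaining = max(skip, 0)
--     for length in range(min_l, max_l + 1):
--         count = n ** length
--         if remaining >= count:
--             remaining -= count
--             continue
--         # least-significant-first digit odometer of the first wanted index,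
--         # with the corresponding characters kept in step
--         digits = []
--         i = remaining
--         for _ in range(length):
--             digits.append(i % n)
--             i //= n
--         word = [chars[d] for d in digits]
--         join = "".join
--         for _ in range(remaining, count):
--             yield join(word[::-1])
--             pos = 0
--             while pos < length and digits[pos] == last:
--                 digits[pos] = 0
--                 word[pos] = chars[0]
--                 pos += 1
--             if pos < length:
--                 d = digits[pos] + 1
--                 digits[pos] = d
--                 word[pos] = chars[d]
--         remaining = 0
-- ===== Notes on version B (the rewrite author's own statement) =====
-- stated objective: alternative
-- what changed: B skips whole per-length blocks arithmetically and decodes each remaining combination directly from its index (base-n digits), instead of enumerating every combination and discarding the first `skip` one by one.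
import Mathlib
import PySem

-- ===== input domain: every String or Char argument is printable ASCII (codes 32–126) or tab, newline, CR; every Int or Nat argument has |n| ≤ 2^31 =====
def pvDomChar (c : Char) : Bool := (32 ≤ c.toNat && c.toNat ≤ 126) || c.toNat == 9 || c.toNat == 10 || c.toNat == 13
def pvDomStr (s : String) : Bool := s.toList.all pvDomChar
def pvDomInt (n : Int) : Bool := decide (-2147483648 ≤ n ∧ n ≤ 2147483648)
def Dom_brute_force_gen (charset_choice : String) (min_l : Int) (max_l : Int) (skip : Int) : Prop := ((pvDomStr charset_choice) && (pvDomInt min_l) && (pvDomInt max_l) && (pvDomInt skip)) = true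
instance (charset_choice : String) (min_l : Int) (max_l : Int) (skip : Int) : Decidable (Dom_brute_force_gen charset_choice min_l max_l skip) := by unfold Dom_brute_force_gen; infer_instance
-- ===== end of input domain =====

-- B replaces A's "enumerate everything and discard the first `skip` combos" by
-- arithmetic block skipping plus a digit odometer started at the first wanted index.
-- Both Pythons are generators; equivalence is about the full sequence of yields (as a list).

-- ===== PORT A =====
-- charset selection, identical in both Pythons (string.digits / ascii_letters / ascii_letters+digits+punctuation)
def pvCharsOf (charset_choice : String) : List Char :=
  if charset_choice = "1" then "0123456789".toList
  else if charset_choice = "2" then "abcdefghijklmnopqrstuvwxyzABCDEFGHIJKLMNOPQRSTUVWXYZ".toList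
  else "abcdefghijklmnopqrstuvwxyzABCDEFGHIJKLMNOPQRSTUVWXYZ0123456789!\"#$%&'()*+,-./:;<=>?@[\\]^_`{|}~".toList

-- itertools.product(chars, repeat=L): leftmost position varies slowest
def pvProd (chars : List Char) : Nat → List (List Char)
  | 0 => [[]]
  | L+1 => chars.flatMap (fun c => (pvProd chars L).map (fun t => c :: t))

def brute_force_gen (charset_choice : String) (min_l : Int) (max_l : Int) (skip : Int) : List String :=
  let chars := pvCharsOf charset_choice
  ((PySem.List.pyRange min_l (max_l + 1) 1).foldl
    (fun (st : Int × List String) length =>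
      (pvProd chars length.toNat).foldl
        (fun st combo =>
          if st.1 < skip then (st.1 + 1, st.2) else (st.1, st.2 ++ [String.mk combo]))
        st)
    (0, [])).2

-- ===== PORT B =====
-- the init loop "digits.append(i % n); i //= n" run `length` times, least-significant digit first (exact hand port)
def pvDigitsLS (n : Nat) : Nat → Nat → List Nat
  | _, 0 => []
  | i, L+1 => i % n :: pvDigitsLS n (i / n) L

-- the odometer-increment while-loop walking digits/word in step from position 0 (exact hand port)
def pvIncLS (chars : List Char) (n : Nat) : List Nat → List Char → List Nat × List Char
  | [], w => ([], w)
  | d :: ds, w =>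
    if d = n - 1 then
      let p := pvIncLS chars n ds w.tail
      (0 :: p.1, chars[0]! :: p.2)
    else ((d + 1) :: ds, chars[d + 1]! :: w.tail)

-- Python's `word` holds 1-char strings; ported as List Char, so join(word[::-1]) = String.mk word.reverse
def brute_force_gen_alt (charset_choice : String) (min_l : Int) (max_l : Int) (skip : Int) : List String :=
  let chars := pvCharsOf charset_choice
  let n := chars.length
  ((PySem.List.pyRange min_l (max_l + 1) 1).foldl
    (fun (st : Nat × List String) length =>
      if n ^ length.toNat ≤ st.1 then (st.1 - n ^ length.toNat, st.2)
      else
        (0, ((PySem.List.pyRange (st.1 : Int) ((n ^ length.toNat : Nat) : Int) 1).foldl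
              (fun (t : List Nat × List Char × List String) _ =>
                let p := pvIncLS chars n t.1 t.2.1
                (p.1, p.2, t.2.2 ++ [String.mk t.2.1.reverse]))
              (pvDigitsLS n st.1 length.toNat,
               (pvDigitsLS n st.1 length.toNat).map (fun d => chars[d]!), st.2)).2.2))
    ((max skip 0).toNat, [])).2

-- ===== PRECONDITION & SPEC =====
-- Pre_ excludes only inputs on which Python A RAISES: a negative length is reached
-- (min_l < 0 and the length range is nonempty), where itertools.product raises ValueError.
def Pre_brute_force_gen (charset_choice : String) (min_l : Int) (max_l : Int) (skip : Int) : Prop :=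
  0 ≤ min_l ∨ max_l < min_l
instance (charset_choice : String) (min_l : Int) (max_l : Int) (skip : Int) : Decidable (Pre_brute_force_gen charset_choice min_l max_l skip) := by unfold Pre_brute_force_gen; infer_instance

def pvWitness_brute_force_gen : String × Int × Int × Int := ("1", 1, 2, 3)

def Spec_brute_force_gen (charset_choice : String) (min_l : Int) (max_l : Int) (skip : Int) (out : List String) : Prop := out = brute_force_gen_alt charset_choice min_l max_l skip
instance (charset_choice : String) (min_l : Int) (max_l : Int) (skip : Int) (out : List String) : Decidable (Spec_brute_force_gen charset_choice min_l max_l skip out) := by unfold Spec_brute_force_gen; infer_instance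

-- ===== CLAIM (what is proved, stated in full; the proofs are below) =====
def Claim_equal_brute_force_gen : Prop := ∀ (charset_choice : String) (min_l : Int) (max_l : Int) (skip : Int), Dom_brute_force_gen charset_choice min_l max_l skip → Pre_brute_force_gen charset_choice min_l max_l skip → Spec_brute_force_gen charset_choice min_l max_l skip (brute_force_gen charset_choice min_l max_l skip)

-- ===== LEMMAS AND PROOFS =====

lemma pvCharsOf_pos (cc : String) : 0 < (pvCharsOf cc).length := by
  unfold pvCharsOf; split
  · decide
  · split <;> decide

lemma pvProd_length (chars : List Char) (L : Nat) :
    (pvProd chars L).length = chars.length ^ L := by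
  induction L with
  | zero => simp [pvProd]
  | succ L ih =>
    simp only [pvProd, List.length_flatMap, List.length_map, ih]
    rw [List.map_const', List.sum_replicate, smul_eq_mul, pow_succ]
    ring

lemma pvMap_getElem!_range (xs : List Char) :
    (List.range xs.length).map (fun i => xs[i]!) = xs := by
  apply List.ext_getElem
  · simp
  · intro i h1 h2
    simp only [List.getElem_map, List.getElem_range]
    rw [getElem!_pos xs i (by simpa using h2)]

lemma pvRange_mul (a b : Nat) :
    List.range (a * b) = (List.range a).flatMap (fun q => (List.range b).map (fun r => q * b + r)) := by
  induction a with
  | zero => simp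
  | succ a ih =>
    rw [Nat.succ_mul, List.range_add, ih, List.range_succ, List.flatMap_append]
    simp

lemma pvFlatMap_idx (xs : List Char) (g : Char → List (List Char)) :
    (List.range xs.length).flatMap (fun i => g xs[i]!) = xs.flatMap g := by
  conv_rhs => rw [← pvMap_getElem!_range xs]
  rw [List.flatMap_map]

lemma pvFlatMap_congr {α β : Type} {l : List α} {f g : α → List β}
    (h : ∀ x ∈ l, f x = g x) : l.flatMap f = l.flatMap g := by
  induction l with
  | nil => rfl
  | cons x xs ih =>
    simp only [List.flatMap_cons]
    rw [h x (List.mem_cons_self), ih (fun y hy => h y (List.mem_cons_of_mem x hy))]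

-- digits of q·n^L + r: the digits of r, then q on top
lemma pvDigitsLS_block (n : Nat) (hn : 0 < n) (q : Nat) (hq : q < n) :
    ∀ (L : Nat) (r : Nat), r < n ^ L →
    pvDigitsLS n (q * n ^ L + r) (L + 1) = pvDigitsLS n r L ++ [q] := by
  intro L
  induction L with
  | zero =>
    intro r hr
    have hr0 : r = 0 := by rw [pow_zero] at hr; omega
    subst hr0
    simp [pvDigitsLS, Nat.mod_eq_of_lt hq]
  | succ L ih =>
    intro r hr
    have hrd : r / n < n ^ L := Nat.div_lt_of_lt_mul (by rw [← pow_succ'] ; exact hr)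
    have hm : (q * n ^ (L+1) + r) % n = r % n := by
      rw [show q * n ^ (L+1) = n * (q * n ^ L) from by ring, Nat.mul_add_mod]
    have hd : (q * n ^ (L+1) + r) / n = q * n ^ L + r / n := by
      rw [show q * n ^ (L+1) = n * (q * n ^ L) from by ring, Nat.mul_add_div hn]
    calc pvDigitsLS n (q * n ^ (L+1) + r) (L + 2)
        = (q * n ^ (L+1) + r) % n :: pvDigitsLS n ((q * n ^ (L+1) + r) / n) (L + 1) := rfl
      _ = r % n :: pvDigitsLS n (q * n ^ L + r / n) (L + 1) := by rw [hm, hd]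
      _ = r % n :: (pvDigitsLS n (r / n) L ++ [q]) := by rw [ih (r / n) hrd]
      _ = pvDigitsLS n r (L + 1) ++ [q] := rfl

-- counting indices 0,…,n^L−1 and reading each digit list MS-first enumerates the cartesian product
lemma pvWords_range (chars : List Char) (hn : 0 < chars.length) (L : Nat) :
    (List.range (chars.length ^ L)).map
        (fun i => ((pvDigitsLS chars.length i L).map (fun d => chars[d]!)).reverse)
      = pvProd chars L := by
  induction L with
  | zero => simp [pvDigitsLS, pvProd, List.range_one]
  | succ L ih =>
    have hb : 0 < chars.length ^ L := pow_pos hn L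
    rw [pow_succ, mul_comm, pvRange_mul, List.map_flatMap]
    have hstep : ∀ q ∈ List.range chars.length,
        ((List.range (chars.length ^ L)).map (fun r => q * chars.length ^ L + r)).map
          (fun i => ((pvDigitsLS chars.length i (L+1)).map (fun d => chars[d]!)).reverse)
        = (pvProd chars L).map (fun t => chars[q]! :: t) := by
      intro q hq
      have hq' : q < chars.length := List.mem_range.mp hq
      rw [List.map_map, ← ih, List.map_map]
      apply List.map_congr_left
      intro r hr
      have hrb : r < chars.length ^ L := List.mem_range.mp hr
      simp only [Function.comp_apply]
      rw [pvDigitsLS_block chars.length hn q hq' L r hrb, List.map_append, List.reverse_append]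
      rfl
    rw [pvFlatMap_congr hstep]
    conv_rhs => rw [pvProd]
    exact pvFlatMap_idx chars (fun c => (pvProd chars L).map (fun t => c :: t))

-- one odometer increment = adding one to the index
lemma pvIncLS_digits (chars : List Char) (hn : 0 < chars.length) :
    ∀ (L : Nat) (i : Nat),
    pvIncLS chars chars.length (pvDigitsLS chars.length i L)
        ((pvDigitsLS chars.length i L).map (fun d => chars[d]!))
      = (pvDigitsLS chars.length (i+1) L,
         (pvDigitsLS chars.length (i+1) L).map (fun d => chars[d]!)) := by
  intro L
  induction L with
  | zero => intro i; rfl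
  | succ L ih =>
    intro i
    have hdm : chars.length * (i / chars.length) + i % chars.length = i :=
      Nat.div_add_mod i chars.length
    have hml : i % chars.length < chars.length := Nat.mod_lt i hn
    have hrw : pvDigitsLS chars.length i (L+1)
        = i % chars.length :: pvDigitsLS chars.length (i / chars.length) L := rfl
    by_cases h : i % chars.length = chars.length - 1
    · have he : i + 1 = chars.length * (i / chars.length + 1) := by
        rw [Nat.mul_succ]; omega
      have hm : (i + 1) % chars.length = 0 := by rw [he, Nat.mul_mod_right]
      have hd : (i + 1) / chars.length = i / chars.length + 1 := by
        rw [he, Nat.mul_div_cancel_left _ hn]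
      have hrw2 : pvDigitsLS chars.length (i+1) (L+1)
          = (i+1) % chars.length :: pvDigitsLS chars.length ((i+1) / chars.length) L := rfl
      simp only [hrw, hrw2, List.map_cons, pvIncLS, if_pos h, List.tail_cons,
        ih (i / chars.length), hm, hd]
    · have hlt2 : i % chars.length + 1 < chars.length := by omega
      have he : i + 1 = chars.length * (i / chars.length) + (i % chars.length + 1) := by omega
      have hm : (i + 1) % chars.length = i % chars.length + 1 := by
        rw [he, Nat.mul_add_mod, Nat.mod_eq_of_lt hlt2]
      have hd : (i + 1) / chars.length = i / chars.length := by
        rw [he, Nat.mul_add_div hn, Nat.div_eq_of_lt hlt2]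
        omega
      have hrw2 : pvDigitsLS chars.length (i+1) (L+1)
          = (i+1) % chars.length :: pvDigitsLS chars.length ((i+1) / chars.length) L := rfl
      simp only [hrw, hrw2, List.map_cons, pvIncLS, if_neg h, List.tail_cons, hm, hd]

-- the odometer loop: K iterations starting at index i yield the words of i, i+1, …, i+K−1
lemma pvFoldOdo (chars : List Char) (hn : 0 < chars.length) (L : Nat) :
    ∀ (l : List Int) (i : Nat) (acc : List String),
    l.foldl (fun (t : List Nat × List Char × List String) _ =>
        let p := pvIncLS chars chars.length t.1 t.2.1
        (p.1, p.2, t.2.2 ++ [String.mk t.2.1.reverse]))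
      (pvDigitsLS chars.length i L,
       (pvDigitsLS chars.length i L).map (fun d => chars[d]!), acc)
    = (pvDigitsLS chars.length (i + l.length) L,
       (pvDigitsLS chars.length (i + l.length) L).map (fun d => chars[d]!),
       acc ++ (List.range l.length).map
         (fun k => String.mk (((pvDigitsLS chars.length (i + k) L).map (fun d => chars[d]!)).reverse))) := by
  intro l
  induction l with
  | nil => intro i acc; simp
  | cons x xs ih =>
    intro i acc
    simp only [List.foldl_cons, pvIncLS_digits chars hn L i]
    rw [ih (i+1) (acc ++ [String.mk (((pvDigitsLS chars.length i L).map (fun d => chars[d]!)).reverse)])]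
    simp only [List.length_cons]
    rw [show i + (xs.length + 1) = i + 1 + xs.length from by omega]
    have hmap : (List.range (xs.length + 1)).map
          (fun k => String.mk (((pvDigitsLS chars.length (i + k) L).map (fun d => chars[d]!)).reverse))
        = String.mk (((pvDigitsLS chars.length i L).map (fun d => chars[d]!)).reverse)
          :: (List.range xs.length).map
            (fun k => String.mk (((pvDigitsLS chars.length (i + 1 + k) L).map (fun d => chars[d]!)).reverse)) := by
      simp only [List.range_succ_eq_map, List.map_cons, List.map_map, Nat.add_zero]
      congr 1
      apply List.map_congr_left
      intro k _
      simp only [Function.comp_apply]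
      rw [show i + Nat.succ k = i + 1 + k from by omega]
    rw [hmap, List.append_assoc, List.singleton_append]

-- A's inner loop over one length: counter advances to skip, the rest is appended
lemma pvInnerA (s : Int) (xs : List (List Char)) : ∀ (c : Int) (acc : List String),
    xs.foldl (fun st combo =>
        if st.1 < s then (st.1 + 1, st.2) else (st.1, st.2 ++ [String.mk combo])) (c, acc)
      = (max c (min s (c + xs.length)), acc ++ ((xs.drop (s - c).toNat).map String.mk)) := by
  induction xs with
  | nil =>
    intro c acc
    simp only [List.foldl_nil, List.drop_nil, List.map_nil, List.append_nil, List.length_nil]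
    rw [Prod.mk.injEq]
    refine ⟨by push_cast; omega, rfl⟩
  | cons x xs ih =>
    intro c acc
    simp only [List.foldl_cons]
    by_cases h : c < s
    · rw [if_pos h, ih (c+1) acc]
      have h1 : (s - c).toNat = (s - (c+1)).toNat + 1 := by omega
      rw [h1, List.drop_succ_cons, Prod.mk.injEq]
      refine ⟨?_, rfl⟩
      simp only [List.length_cons]
      push_cast
      omega
    · rw [if_neg h, ih c (acc ++ [String.mk x])]
      have h0 : (s - c).toNat = 0 := by omega
      rw [h0, List.drop_zero, Prod.mk.injEq]
      constructor
      · simp only [List.length_cons]; push_cast; omega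
      · simp

-- the main loop invariant: A's state (c, acc) corresponds to B's state ((s-c).toNat, acc)
lemma pvOuter (chars : List Char) (hn : 0 < chars.length) (s : Int) :
    ∀ (Ls : List Int) (c : Int) (acc : List String), 0 ≤ c → c ≤ max s 0 →
    (Ls.foldl (fun (st : Int × List String) length =>
        (pvProd chars length.toNat).foldl (fun st combo =>
          if st.1 < s then (st.1 + 1, st.2) else (st.1, st.2 ++ [String.mk combo])) st) (c, acc)).2
    = (Ls.foldl (fun (st : Nat × List String) length =>
        if chars.length ^ length.toNat ≤ st.1 then (st.1 - chars.length ^ length.toNat, st.2)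
        else
          (0, ((PySem.List.pyRange (st.1 : Int) ((chars.length ^ length.toNat : Nat) : Int) 1).foldl
                (fun (t : List Nat × List Char × List String) _ =>
                  let p := pvIncLS chars chars.length t.1 t.2.1
                  (p.1, p.2, t.2.2 ++ [String.mk t.2.1.reverse]))
                (pvDigitsLS chars.length st.1 length.toNat,
                 (pvDigitsLS chars.length st.1 length.toNat).map (fun d => chars[d]!), st.2)).2.2))
        ((s - c).toNat, acc)).2 := by
  intro Ls
  induction Ls with
  | nil => intro c acc _ _; rfl
  | cons L Ls ih =>
    intro c acc hc0 hcs
    simp only [List.foldl_cons, pvInnerA]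
    have hlen : (pvProd chars L.toNat).length = chars.length ^ L.toNat := pvProd_length chars L.toNat
    have hwr := pvWords_range chars hn L.toNat
    revert hlen hwr
    generalize hgen : chars.length ^ L.toNat = cnt
    intro hlen hwr
    have hcntpos : 0 < cnt := hgen ▸ pow_pos hn L.toNat
    by_cases hcase : cnt ≤ (s - c).toNat
    · -- whole block skipped
      have hcs' : c + (cnt : Int) ≤ s := by omega
      rw [if_pos hcase]
      have hdrop : (pvProd chars L.toNat).drop (s - c).toNat = [] :=
        List.drop_eq_nil_of_le (by omega)
      rw [hdrop]
      have hcc : max c (min s (c + ((pvProd chars L.toNat).length : Int))) = c + cnt := by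
        rw [hlen]; omega
      rw [hcc, List.map_nil, List.append_nil]
      rw [ih (c + cnt) acc (by omega) (by omega),
        show (s - (c + (cnt : Int))).toNat = (s - c).toNat - cnt from by omega]
    · -- block partially (or fully) emitted by the odometer
      have hlt : (s - c).toNat < cnt := by omega
      rw [if_neg hcase]
      have hcc : max c (min s (c + ((pvProd chars L.toNat).length : Int))) = max c (min s (c + cnt)) := by
        rw [hlen]
      rw [hcc]
      have hnext : (s - max c (min s (c + (cnt : Int)))).toNat = 0 := by omega
      have hK : (PySem.List.pyRange ((s - c).toNat : Int) ((cnt : Nat) : Int) 1).length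
          = cnt - (s - c).toNat := by
        rw [PySem.List.length_pyRange_one]; omega
      rw [pvFoldOdo chars hn L.toNat _ (s - c).toNat acc, hK]
      have hacc : ((pvProd chars L.toNat).drop (s - c).toNat).map String.mk
          = (List.range (cnt - (s - c).toNat)).map
              (fun k => String.mk (((pvDigitsLS chars.length ((s - c).toNat + k) L.toNat).map
                (fun d => chars[d]!)).reverse)) := by
        rw [← hwr]
        have hsplit : List.range cnt
            = List.range (s - c).toNat
              ++ (List.range (cnt - (s - c).toNat)).map (fun k => (s - c).toNat + k) := by
          rw [← List.range_add]; congr 1; omega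
        have hdl : ((List.range (s - c).toNat).map
            (fun i => ((pvDigitsLS chars.length i L.toNat).map (fun d => chars[d]!)).reverse)).length
            = (s - c).toNat := by simp
        rw [hsplit, List.map_append, List.drop_left' hdl, List.map_map, List.map_map]
        rfl
      rw [hacc]
      rw [ih (max c (min s (c + (cnt : Int)))) _ (by omega) (by omega), hnext]

-- ===== VERDICT (by name: the statement is the Claim_ definition above) =====
theorem brute_force_gen_spec : Claim_equal_brute_force_gen := by
  intro cc mn mx sk _ _
  unfold Spec_brute_force_gen brute_force_gen brute_force_gen_alt
  have h := pvOuter (pvCharsOf cc) (pvCharsOf_pos cc) sk (PySem.List.pyRange mn (mx + 1) 1) 0 [] le_rfl (le_max_right sk 0)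
  simp only [sub_zero] at h
  rw [show Int.toNat sk = (max sk 0).toNat from by omega] at h
  exact h
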